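-- pv_equiv track=rewrite | github.com/animesh-algorithm/dsa-prep | Recursion/StringQuestions/removeApple.py | removeAppNotApple
-- ===== SOURCE A (Python) =====
-- def removeAppNotApple(s):
--     if s == "":
--         return s
--     if s.startswith("app"):
--         if s.startswith("apple"):
--             return s[0] + removeAppNotApple(s[1:])
--         else:
--             return removeAppNotApple(s[3:])
--     return s[0] + removeAppNotApple(s[1:])
-- ===== SOURCE B (Python) =====
-- def removeAppNotApple(s):
--     out = []
--     i, n = 0, len(s)
--     while i < n:
--         if s[i:i+3] == "app" and s[i:i+5] != "apple":
--             i += 3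
--         else:
--             out.append(s[i])
--             i += 1
--     return "".join(out)
-- ===== Notes on version B (the rewrite author's own statement) =====
-- stated objective: faster
-- what changed: Replaces A's recursion that rebuilds a new string slice at every step with a single forward index scan appending kept characters to a buffer.
import Mathlib
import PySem

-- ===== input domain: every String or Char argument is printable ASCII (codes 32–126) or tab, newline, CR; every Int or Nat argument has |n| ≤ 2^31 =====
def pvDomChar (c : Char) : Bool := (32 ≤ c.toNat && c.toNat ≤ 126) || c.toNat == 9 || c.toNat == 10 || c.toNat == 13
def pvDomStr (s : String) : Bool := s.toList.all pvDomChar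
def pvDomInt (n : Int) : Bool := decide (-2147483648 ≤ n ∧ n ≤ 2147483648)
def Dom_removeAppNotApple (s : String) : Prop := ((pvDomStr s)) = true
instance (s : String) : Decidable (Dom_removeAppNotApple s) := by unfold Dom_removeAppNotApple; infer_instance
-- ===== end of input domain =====

-- B replaces A's recursion (which copies a fresh string slice at every step) with one
-- forward index scan over the string and an output buffer; objective: faster.

-- ===== PORT A =====
-- A's recursion on the string, transliterated over List Char; s[1:]/s[3:] are tail / drop 2 of the tail.
def pvGoA : List Char → List Char
  | [] => []                                           -- s == ""
  | c :: rest =>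
    if PySem.Chars.startswith (c :: rest) ['a','p','p'] then
      if PySem.Chars.startswith (c :: rest) ['a','p','p','l','e'] then
        c :: pvGoA rest                                -- s[0] + f(s[1:])
      else
        pvGoA (rest.drop 2)                            -- f(s[3:])
    else c :: pvGoA rest                               -- s[0] + f(s[1:])
termination_by l => l.length
decreasing_by all_goals (simp; try omega)

def removeAppNotApple (s : String) : String := String.ofList (pvGoA s.toList)

-- ===== PORT B =====
-- B's while loop: index i, output buffer out (appended at the end as in list.append).
def pvGoB (s : List Char) (i : Nat) (out : List Char) : List Char :=
  if h : i < s.length then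
    if PySem.List.slice s (some (i : Int)) (some ((i : Int) + 3)) = ['a','p','p'] ∧
       PySem.List.slice s (some (i : Int)) (some ((i : Int) + 5)) ≠ ['a','p','p','l','e'] then
      pvGoB s (i + 3) out
    else
      pvGoB s (i + 1) (out ++ [s[i]])
  else out
termination_by s.length - i

def removeAppNotApple_alt (s : String) : String := String.ofList (pvGoB s.toList 0 [])

-- ===== PRECONDITION & SPEC =====
def Spec_removeAppNotApple (s : String) (out : String) : Prop := out = removeAppNotApple_alt s
instance (s : String) (out : String) : Decidable (Spec_removeAppNotApple s out) := by unfold Spec_removeAppNotApple; infer_instance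

-- ===== CLAIM (what is proved, stated in full; the proofs are below) =====
def Claim_equal_removeAppNotApple : Prop := ∀ (s : String), Dom_removeAppNotApple s → Spec_removeAppNotApple s (removeAppNotApple s)

-- ===== LEMMAS AND PROOFS =====

-- B's slice test s[i:i+k] == p is the prefix test p <+: s.drop i (for p of length k).
lemma pvSlice_eq_take (s : List Char) (i k : Nat) :
    PySem.List.slice s (some (i : Int)) (some ((i : Int) + (k : Nat))) = (s.drop i).take k := by
  exact PySem.List.slice_natCast_add s i k

-- the main invariant: from index i, B produces out ++ A-of-the-rest
lemma pvGoB_eq (s : List Char) (i : Nat) (out : List Char) :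
    pvGoB s i out = out ++ pvGoA (s.drop i) := by
  by_cases h : i < s.length
  · have hdrop : s.drop i ≠ [] := by
      intro hnil; have := List.drop_eq_nil_iff.mp hnil; omega
    obtain ⟨c, rest, hcr⟩ := List.exists_cons_of_ne_nil hdrop
    have h3 : PySem.List.slice s (some (i : Int)) (some ((i : Int) + 3)) = (s.drop i).take 3 := by
      have := pvSlice_eq_take s i 3; simpa using this
    have h5 : PySem.List.slice s (some (i : Int)) (some ((i : Int) + 5)) = (s.drop i).take 5 := by
      have := pvSlice_eq_take s i 5; simpa using this
    have happ : (PySem.Chars.startswith (s.drop i) ['a','p','p'] = true) ↔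
        (s.drop i).take 3 = ['a','p','p'] := by
      rw [PySem.Chars.startswith_iff]
      constructor
      · intro hp; exact (List.prefix_iff_eq_take.mp hp).symm
      · intro ht; exact List.prefix_iff_eq_take.mpr ht.symm
    have happle : (PySem.Chars.startswith (s.drop i) ['a','p','p','l','e'] = true) ↔
        (s.drop i).take 5 = ['a','p','p','l','e'] := by
      rw [PySem.Chars.startswith_iff]
      constructor
      · intro hp; exact (List.prefix_iff_eq_take.mp hp).symm
      · intro ht; exact List.prefix_iff_eq_take.mpr ht.symm
    have hhead : s[i] = c := by
      have h0 : 0 < (s.drop i).length := by rw [hcr]; simp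
      have : (s.drop i)[0]'h0 = s[i] := by simp
      rw [List.getElem_of_eq hcr] at this; simpa using this.symm
    rw [pvGoB, dif_pos h, h3, h5]
    by_cases hc : (s.drop i).take 3 = ['a','p','p'] ∧ (s.drop i).take 5 ≠ ['a','p','p','l','e']
    · rw [if_pos hc]
      rw [pvGoB_eq s (i + 3) out]
      congr 1
      conv_lhs => rw [show i + 3 = i + 3 from rfl]
      -- A side: drop i starts with app, not apple → A skips 3
      rw [hcr, pvGoA]
      rw [if_pos (by rw [← hcr]; exact happ.mpr hc.1)]
      rw [if_neg (by rw [← hcr]; intro habs; exact hc.2 (happle.mp habs))]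
      have hr3 : rest.drop 2 = s.drop (i + 3) := by
        have h33 : (s.drop i).drop 3 = s.drop (i + 3) := by
          rw [List.drop_drop]
        rw [hcr] at h33; simpa using h33
      rw [hr3]
    · rw [if_neg hc]
      rw [pvGoB_eq s (i + 1) (out ++ [s[i]])]
      rw [List.append_assoc]
      congr 1
      rw [hcr, pvGoA, hhead]
      have hrest : rest = s.drop (i + 1) := by
        have : (s.drop i).drop 1 = s.drop (i + 1) := by
          rw [List.drop_drop]
        rw [hcr] at this; simpa using this
      by_cases ha : PySem.Chars.startswith (c :: rest) ['a','p','p'] = true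
      · rw [if_pos ha]
        have h5' : (s.drop i).take 5 = ['a','p','p','l','e'] := by
          by_contra hne
          exact hc ⟨happ.mp (by rw [hcr]; exact ha), hne⟩
        rw [if_pos (by rw [← hcr]; exact happle.mpr h5')]
        rw [hrest]; simp
      · rw [if_neg ha, hrest]; simp
  · rw [pvGoB, dif_neg h]
    have : s.drop i = [] := List.drop_eq_nil_iff.mpr (by omega)
    rw [this, pvGoA]; simp
termination_by s.length - i
decreasing_by all_goals omega

-- ===== VERDICT (by name: the statement is the Claim_ definition above) =====
theorem removeAppNotApple_spec : Claim_equal_removeAppNotApple := by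
  intro s _
  unfold Spec_removeAppNotApple removeAppNotApple removeAppNotApple_alt
  rw [pvGoB_eq]
  simp
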